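-- pv_equiv track=rewrite | github.com/Seungwuk98/Algorithm-Solving-python3 | codingtest3-devmatching.py | check
-- ===== SOURCE A (Python) =====
-- def check(w):
--     n = len(w)
--     k = [0]*n
--     i, j = 0, 1
--     while j < n:
--         if w[i] == w[j]:
--             k[j] = i+1
--             i += 1
--             j += 1
--         else:
--             if not i:
--                 k[j] = 0
--                 j += 1
--             else:
--                 i = k[i-1]
--     return n-k[n-1]
-- ===== SOURCE B (Python) =====
-- def check(w):
--     # Smallest period of w, searched directly: first p >= 1 with w[p:] == w[:n-p], else n.
--     # (Equals n minus the longest proper border, which is what A's KMP prefix function computes.)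
--     n = len(w)
--     for p in range(1, n):
--         if w[p:] == w[:n - p]:
--             return p
--     return n
-- ===== Notes on version B (the rewrite author's own statement) =====
-- stated objective: simpler
-- what changed: Replaces the KMP prefix-function loop (n minus last failure-function value) by a direct search for the smallest period: the first shift p with w[p:] == w[:n-p], else n.
-- outside the precondition, e.g. on check(''): A raises IndexError, B returns 0
-- crash fix: On the empty string A raises IndexError (k[-1] on an empty list); B returns 0. — e.g. on check(""): A raises IndexError, B returns 0
import Mathlib
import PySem

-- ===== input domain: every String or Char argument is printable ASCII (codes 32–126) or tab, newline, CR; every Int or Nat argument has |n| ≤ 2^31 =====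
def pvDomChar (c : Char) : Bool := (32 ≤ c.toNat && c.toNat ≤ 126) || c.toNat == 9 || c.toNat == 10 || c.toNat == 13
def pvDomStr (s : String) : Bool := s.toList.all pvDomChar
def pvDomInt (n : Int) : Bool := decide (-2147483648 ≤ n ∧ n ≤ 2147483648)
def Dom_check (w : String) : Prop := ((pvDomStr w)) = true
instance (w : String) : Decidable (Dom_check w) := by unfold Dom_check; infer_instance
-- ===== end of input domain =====

-- B replaces A's KMP prefix-function loop by a direct search for the smallest period
-- (first p ≥ 1 with w[p:] == w[:n-p], else n); simpler, not faster. Pre_ excludes "",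
-- where A raises IndexError.


-- ===== PORT A =====
-- A's while loop over state (k, i, j). In the final branch Python does `i = k[i-1]`;
-- the `min … (i-1)` is a pure termination guard: on every reachable state k[i-1] ≤ i-1,
-- so the computed value is exactly k[i-1].
def checkLoop (l : List Char) (n : Nat) (k : List Nat) (i j : Nat) : List Nat :=
  if h : j < n then
    if l.getD i ' ' = l.getD j ' ' then
      checkLoop l n (k.set j (i + 1)) (i + 1) (j + 1)
    else if hi : i = 0 then
      checkLoop l n (k.set j 0) i (j + 1)
    else
      checkLoop l n k (min (k.getD (i - 1) 0) (i - 1)) j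
  else k
termination_by 2 * (n - j) + i
decreasing_by all_goals omega

-- for w = "" Python raises IndexError on k[-1]; excluded by Pre_check
def check (w : String) : Int :=
  let l := w.toList
  let n := l.length
  let k := checkLoop l n (List.replicate n 0) 0 1
  (n : Int) - (k.getD (n - 1) 0 : Int)

-- ===== PORT B =====
-- B's `for p in range(1, n)`: fuel counts the remaining iterations (initially n-1),
-- p is the current shift; falling off the loop returns n.
def altGo (l : List Char) (n : Nat) : Nat → Nat → Int
  | _, 0 => (n : Int)
  | p, fuel + 1 =>
    if l.drop p = l.take (n - p) then (p : Int) else altGo l n (p + 1) fuel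

def check_alt (w : String) : Int :=
  altGo w.toList w.toList.length 1 (w.toList.length - 1)

-- ===== PRECONDITION & SPEC =====
-- A raises IndexError on the empty string (k[-1] on the empty list); nothing else is excluded.
def Pre_check (w : String) : Prop := w ≠ ""
instance (w : String) : Decidable (Pre_check w) := by unfold Pre_check; infer_instance
def pvWitness_check : String := "ab"

-- On the empty string A raises IndexError (k[-1] on an empty list); B returns 0.
def Raises_check (w : String) : Prop := w = ""
instance (w : String) : Decidable (Raises_check w) := by unfold Raises_check; infer_instance
def pvRaiseWitness_check : String := ""
def pvRaiseWitnessOut_check : Int := 0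

def Spec_check (w : String) (out : Int) : Prop := out = check_alt w
instance (w : String) (out : Int) : Decidable (Spec_check w out) := by unfold Spec_check; infer_instance

-- ===== CLAIM (what is proved, stated in full; the proofs are below) =====
def Claim_equal_check : Prop := ∀ (w : String), Dom_check w → Pre_check w → Spec_check w (check w)
def Claim_raises_check : Prop := (∀ (w : String), Dom_check w → Raises_check w → ¬ Pre_check w) ∧ (Dom_check (pvRaiseWitness_check) ∧ Raises_check (pvRaiseWitness_check) ∧ check_alt (pvRaiseWitness_check) = pvRaiseWitnessOut_check)

-- ===== LEMMAS AND PROOFS =====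

-- `Brd l m b`: the prefix of l of length m has a border of length b
-- (pointwise: its last b characters equal its first b characters).
abbrev Brd (l : List Char) (m b : Nat) : Prop :=
  ∀ t, t < b → l.getD (m - b + t) ' ' = l.getD t ' '

-- prefix-function value: longest proper border of the length-m prefix
def pfun (l : List Char) (m : Nat) : Nat :=
  Nat.findGreatest (fun b => Brd l m b) (m - 1)

theorem brd_zero (l : List Char) (m : Nat) : Brd l m 0 :=
  fun t ht => absurd ht (by omega)

theorem pfun_spec (l : List Char) (m : Nat) : Brd l m (pfun l m) :=
  Nat.findGreatest_spec (Nat.zero_le _) (brd_zero l m)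

theorem brd_trans {l : List Char} {m b c : Nat} (hc : c ≤ b) (hb : b ≤ m)
    (h1 : Brd l m b) (h2 : Brd l b c) : Brd l m c := by
  intro t ht
  have h3 := h1 (b - c + t) (by omega)
  have h4 := h2 t ht
  have e1 : m - b + (b - c + t) = m - c + t := by omega
  rw [e1] at h3
  exact h3.trans h4

theorem brd_nested {l : List Char} {m b c : Nat} (hc : c ≤ b) (hb : b ≤ m)
    (h1 : Brd l m b) (h2 : Brd l m c) : Brd l b c := by
  intro t ht
  have h3 := h1 (b - c + t) (by omega)
  have h4 := h2 t ht
  have e1 : m - b + (b - c + t) = m - c + t := by omega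
  rw [e1] at h3
  exact h3.symm.trans h4

theorem brd_ext {l : List Char} {m c : Nat} (h1 : 1 ≤ c) (hcm : c ≤ m) :
    Brd l (m + 1) c ↔ (Brd l m (c - 1) ∧ l.getD (c - 1) ' ' = l.getD m ' ') := by
  constructor
  · intro h
    refine ⟨fun t ht => ?_, ?_⟩
    · have h2 := h t (by omega)
      have e : m + 1 - c + t = m - (c - 1) + t := by omega
      rw [e] at h2; exact h2
    · have h2 := h (c - 1) (by omega)
      have e : m + 1 - c + (c - 1) = m := by omega
      rw [e] at h2; exact h2.symm
  · rintro ⟨hb, hch⟩ t ht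
    by_cases hte : t = c - 1
    · subst hte
      have e : m + 1 - c + (c - 1) = m := by omega
      rw [e]; exact hch.symm
    · have h2 := hb t (by omega)
      have e : m + 1 - c + t = m - (c - 1) + t := by omega
      rw [e]; exact h2

theorem getD_set_ne (k : List Nat) {j t : Nat} (v : Nat) (h : j ≠ t) :
    (k.set j v).getD t 0 = k.getD t 0 := by
  simp [List.getD_eq_getElem?_getD, List.getElem?_set_ne h]

theorem getD_set_self (k : List Nat) {j : Nat} (v : Nat) (h : j < k.length) :
    (k.set j v).getD j 0 = v := by
  simp [List.getD_eq_getElem?_getD, h]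

-- main invariant for A's loop: once the recorded entries are the prefix-function
-- values, i is a border of the length-j prefix maximal among borders extendable by w[j]
theorem checkLoop_correct (l : List Char) (n : Nat) (hn : n = l.length) :
    ∀ N k i j, 2 * (n - j) + i < N → 1 ≤ j → j ≤ n → i < j → k.length = n →
      (∀ t, t < j → k.getD t 0 = pfun l (t + 1)) →
      Brd l j i →
      (∀ b, b < j → Brd l j b → i < b → l.getD b ' ' ≠ l.getD j ' ') →
      ∀ t, t < n → (checkLoop l n k i j).getD t 0 = pfun l (t + 1) := by
  intro N
  induction N with
  | zero => intro k i j hm; omega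
  | succ N ih =>
    intro k i j hm h1j hjn hij hkl hkorr hbrd hmax t htn
    rw [checkLoop]
    by_cases hjlt : j < n
    · rw [dif_pos hjlt]
      by_cases hch : l.getD i ' ' = l.getD j ' '
      · rw [if_pos hch]
        have hb1 : Brd l (j + 1) (i + 1) := by
          rw [brd_ext (by omega) (by omega)]
          simpa using ⟨hbrd, hch⟩
        have hle : i + 1 ≤ pfun l (j + 1) :=
          Nat.le_findGreatest (by omega) hb1
        have hge : pfun l (j + 1) ≤ i + 1 := by
          by_contra hcon
          push Not at hcon
          have hple : pfun l (j + 1) ≤ j := Nat.findGreatest_le _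
          have hspec : Brd l (j + 1) (pfun l (j + 1)) := pfun_spec l (j + 1)
          rw [brd_ext (by omega) (by omega)] at hspec
          exact hmax (pfun l (j + 1) - 1) (by omega) hspec.1 (by omega) hspec.2
        have key1 : pfun l (j + 1) = i + 1 := le_antisymm hge hle
        refine ih (k.set j (i + 1)) (i + 1) (j + 1) (by omega) (by omega) (by omega)
          (by omega) (by simp [hkl]) ?_ hb1 ?_ t htn
        · intro s hs
          by_cases hsj : s = j
          · subst hsj
            rw [getD_set_self k (i + 1) (by omega), key1]
          · rw [getD_set_ne k (i + 1) (fun h => hsj h.symm)]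
            exact hkorr s (by omega)
        · intro b hb hbrdb hib
          have : b ≤ pfun l (j + 1) := Nat.le_findGreatest (by omega) hbrdb
          omega
      · rw [if_neg hch]
        by_cases hi0 : i = 0
        · rw [dif_pos hi0]
          subst hi0
          have key0 : pfun l (j + 1) = 0 := by
            by_contra hcon
            have hpos : 0 < pfun l (j + 1) := Nat.pos_of_ne_zero hcon
            have hple : pfun l (j + 1) ≤ j := Nat.findGreatest_le _
            have hspec : Brd l (j + 1) (pfun l (j + 1)) := pfun_spec l (j + 1)
            rw [brd_ext (by omega) (by omega)] at hspec
            by_cases hb1 : pfun l (j + 1) - 1 = 0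
            · rw [hb1] at hspec; exact hch hspec.2
            · exact hmax (pfun l (j + 1) - 1) (by omega) hspec.1 (by omega) hspec.2
          refine ih (k.set j 0) 0 (j + 1) (by omega) (by omega) (by omega) (by omega)
            (by simp [hkl]) ?_ (brd_zero l (j + 1)) ?_ t htn
          · intro s hs
            by_cases hsj : s = j
            · subst hsj
              rw [getD_set_self k 0 (by omega), key0]
            · rw [getD_set_ne k 0 (fun h => hsj h.symm)]
              exact hkorr s (by omega)
          · intro b hb hbrdb hib
            have : b ≤ pfun l (j + 1) := Nat.le_findGreatest (by omega) hbrdb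
            omega
        · rw [dif_neg hi0]
          have hk1 : k.getD (i - 1) 0 = pfun l i := by
            have := hkorr (i - 1) (by omega)
            rwa [show i - 1 + 1 = i by omega] at this
          have hple : pfun l i ≤ i - 1 := Nat.findGreatest_le _
          have hmin : min (k.getD (i - 1) 0) (i - 1) = pfun l i := by
            rw [hk1]; omega
          rw [hmin]
          have hbi : Brd l i (pfun l i) := pfun_spec l i
          refine ih k (pfun l i) j (by omega) h1j hjn (by omega) hkl hkorr
            (brd_trans (by omega) (by omega) hbrd hbi) ?_ t htn
          intro b hb hbrdb hib
          rcases lt_trichotomy b i with hbi' | hbi' | hbi'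
          · have hnest : Brd l i b := brd_nested (by omega) (by omega) hbrd hbrdb
            have : b ≤ pfun l i := Nat.le_findGreatest (by omega) hnest
            omega
          · subst hbi'; exact hch
          · exact hmax b hb hbrdb hbi'
    · rw [dif_neg hjlt]
      exact hkorr t (by omega)

theorem check_eq (w : String) (h : w.toList ≠ []) :
    check w = (w.toList.length : Int) - (pfun w.toList w.toList.length : Int) := by
  have hn : 1 ≤ w.toList.length := by
    cases hl : w.toList with
    | nil => exact absurd hl h
    | cons a l => simp
  have hfin := checkLoop_correct w.toList w.toList.length rfl
    (2 * w.toList.length + 2) (List.replicate w.toList.length 0) 0 1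
    (by omega) (by omega) hn (by omega) (by simp)
    (by
      intro t ht
      have ht0 : t = 0 := by omega
      subst ht0
      simp [pfun, Nat.findGreatest])
    (brd_zero _ _)
    (by intro b hb _ hib; omega)
    (w.toList.length - 1) (by omega)
  show (w.toList.length : Int) - _ = _
  rw [hfin, show w.toList.length - 1 + 1 = w.toList.length by omega]

theorem brd_iff_slice (l : List Char) (n b : Nat) (hn : n = l.length) (hb : b ≤ n) :
    (l.drop (n - b) = l.take b) ↔ Brd l n b := by
  subst hn
  constructor
  · intro h t ht
    have h2 := congrArg (fun s => s.getD t ' ') h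
    simp only [List.getD_eq_getElem?_getD, List.getElem?_drop, List.getElem?_take] at h2 ⊢
    rw [if_pos ht] at h2
    exact h2
  · intro h
    apply List.ext_getElem
    · simp; omega
    · intro t h1 h2
      have ht : t < b := by simp at h2; omega
      have h3 := h t ht
      have hi1 : l.length - b + t < l.length := by omega
      have hi2 : t < l.length := by omega
      simp only [List.getD_eq_getElem?_getD, List.getElem?_eq_getElem hi1,
        List.getElem?_eq_getElem hi2, Option.getD_some] at h3
      simpa [List.getElem_drop, List.getElem_take] using h3

theorem altGo_correct (l : List Char) (n : Nat) (hn : n = l.length) :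
    ∀ fuel p, 1 ≤ p → p + fuel = n → pfun l n ≤ n - p →
      altGo l n p fuel = (n : Int) - (pfun l n : Int) := by
  intro fuel
  induction fuel with
  | zero =>
    intro p h1 hpn hub
    have h0 : pfun l n = 0 := by omega
    simp [altGo, h0]
  | succ fuel ih =>
    intro p h1 hpn hub
    rw [altGo]
    by_cases heq : l.drop p = l.take (n - p)
    · rw [if_pos heq]
      have hbrd : Brd l n (n - p) := by
        rw [← brd_iff_slice l n (n - p) hn (by omega)]
        rwa [show n - (n - p) = p by omega]
      have hle : n - p ≤ pfun l n := Nat.le_findGreatest (by omega) hbrd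
      have hpf : pfun l n = n - p := by omega
      rw [hpf]; omega
    · rw [if_neg heq]
      refine ih (p + 1) (by omega) (by omega) ?_
      by_contra hcon
      push Not at hcon
      have hpf : pfun l n = n - p := by omega
      have hbrd : Brd l n (n - p) := hpf ▸ pfun_spec l n
      rw [← brd_iff_slice l n (n - p) hn (by omega)] at hbrd
      rw [show n - (n - p) = p by omega] at hbrd
      exact heq hbrd

theorem alt_eq (w : String) (h : w.toList ≠ []) :
    check_alt w = (w.toList.length : Int) - (pfun w.toList w.toList.length : Int) := by
  have hn : 1 ≤ w.toList.length := by
    cases hl : w.toList with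
    | nil => exact absurd hl h
    | cons a l => simp
  unfold check_alt
  exact altGo_correct w.toList w.toList.length rfl (w.toList.length - 1) 1
    (by omega) (by omega) (by simpa [pfun] using Nat.findGreatest_le (P := fun b => Brd w.toList w.toList.length b) (w.toList.length - 1))

theorem toList_ne_nil (w : String) (h : w ≠ "") : w.toList ≠ [] := by
  intro hl
  apply h
  have h2 := congrArg String.ofList hl
  simpa using h2

-- ===== VERDICT (by name: the statement is the Claim_ definition above) =====
theorem check_spec : Claim_equal_check := by
  intro w _ hpre
  unfold Spec_check
  rw [check_eq w (toList_ne_nil w hpre), alt_eq w (toList_ne_nil w hpre)]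

def check_raises : Claim_raises_check := by
  unfold Claim_raises_check
  exact ⟨fun w _ hr hp => hp hr, by decide⟩
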